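-- pv_equiv track=rewrite | github.com/alaminjwel/code-base | coderbyte/Hard/Roman Numeral Reduction.py | RomanNumeralReduction
-- ===== SOURCE A (Python) =====
-- def RomanNumeralReduction(strParam):
--   romanDecimalMap = {
--     'M': 1000,
--     'D': 500,
--     'C': 100,
--     'L': 50,
--     'X': 10,
--     'V': 5,
--     'I': 1
--   }
--
--   decimal = 0
--   for char in strParam:
--     decimal += romanDecimalMap[char]
--
--   roman = ""
--   deciamlRomanMap = {
--     1000: 'M',
--     900: 'CM',
--     500: 'D',
--     400: 'CD',
--     100: 'C',
--     90: 'XC',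
--     50: 'L',
--     40: 'XL',
--     10: 'X',
--     9: 'IX',
--     5: 'V',
--     4: 'IV',
--     1: 'I'
--   }
--
--   for base,sym in deciamlRomanMap.items():
--       roman += sym*(decimal//base)
--       decimal %= base
--   return roman
-- ===== SOURCE B (Python) =====
-- def RomanNumeralReduction(strParam):
--   romanDecimalMap = {
--     'M': 1000,
--     'D': 500,
--     'C': 100,
--     'L': 50,
--     'X': 10,
--     'V': 5,
--     'I': 1
--   }
--   decimal = sum(romanDecimalMap[c] for c in strParam)
--   ones = ["", "I", "II", "III", "IV", "V", "VI", "VII", "VIII", "IX"]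
--   tens = ["", "X", "XX", "XXX", "XL", "L", "LX", "LXX", "LXXX", "XC"]
--   hundreds = ["", "C", "CC", "CCC", "CD", "D", "DC", "DCC", "DCCC", "CM"]
--   return ("M" * (decimal // 1000)
--           + hundreds[decimal // 100 % 10]
--           + tens[decimal // 10 % 10]
--           + ones[decimal % 10])
-- ===== Notes on version B (the rewrite author's own statement) =====
-- stated objective: alternative
-- what changed: The greedy 13-entry repeated-subtraction loop that rebuilds the numeral is replaced by the place-value method: digit tables for ones/tens/hundreds indexed by the decimal digits, plus the thousands letter repeated by the unbounded thousands count; the summing loop stays.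
import Mathlib
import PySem

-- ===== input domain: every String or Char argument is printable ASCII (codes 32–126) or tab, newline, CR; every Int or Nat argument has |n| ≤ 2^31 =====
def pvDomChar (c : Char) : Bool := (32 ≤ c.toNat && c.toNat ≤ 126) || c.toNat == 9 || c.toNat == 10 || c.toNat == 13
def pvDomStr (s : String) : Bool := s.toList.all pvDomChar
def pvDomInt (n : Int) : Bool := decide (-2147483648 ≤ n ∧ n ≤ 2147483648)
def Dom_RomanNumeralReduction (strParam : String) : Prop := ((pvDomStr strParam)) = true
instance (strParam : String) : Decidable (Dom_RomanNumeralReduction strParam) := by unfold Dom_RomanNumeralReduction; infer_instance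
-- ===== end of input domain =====

-- B replaces A's greedy 13-entry subtraction loop by the place-value method (digit tables
-- for ones/tens/hundreds plus the thousands letter repeated by its count); the summing loop stays.

-- ===== PORT A =====
-- the dict literal romanDecimalMap
def pvRomanDecimalMap : PySem.Dict Char Int :=
  PySem.Dict.ofList [('M', 1000), ('D', 500), ('C', 100), ('L', 50), ('X', 10), ('V', 5), ('I', 1)]

-- the first loop: decimal += romanDecimalMap[char]  (getD 0 stands for the lookup;
-- Pre_ admits exactly the strings whose chars are keys, i.e. where Python does not raise KeyError)
def pvSumLoop (cs : List Char) : Int :=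
  cs.foldl (fun decimal char => decimal + pvRomanDecimalMap.getD char 0) 0

-- the dict literal deciamlRomanMap, as its (insertion-ordered) items
def pvDeciamlRomanMap : List (Int × List Char) :=
  [(1000, ['M']), (900, ['C','M']), (500, ['D']), (400, ['C','D']), (100, ['C']),
   (90, ['X','C']), (50, ['L']), (40, ['X','L']), (10, ['X']), (9, ['I','X']),
   (5, ['V']), (4, ['I','V']), (1, ['I'])]

-- one iteration of the second loop: roman += sym*(decimal//base); decimal %= base
def pvStep (st : List Char × Int) (p : Int × List Char) : List Char × Int :=
  (st.1 ++ PySem.List.pyRepeat p.2 (PySem.Int.floordiv st.2 p.1),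
   PySem.Int.mod st.2 p.1)

-- the second loop
def pvGreedyLoop (decimal : Int) : List Char :=
  (pvDeciamlRomanMap.foldl pvStep ([], decimal)).1

def RomanNumeralReduction (strParam : String) : String :=
  String.ofList (pvGreedyLoop (pvSumLoop strParam.toList))

-- ===== PORT B =====
def pvOnes : List (List Char) :=
  [[], ['I'], ['I','I'], ['I','I','I'], ['I','V'], ['V'], ['V','I'], ['V','I','I'], ['V','I','I','I'], ['I','X']]
def pvTens : List (List Char) :=
  [[], ['X'], ['X','X'], ['X','X','X'], ['X','L'], ['L'], ['L','X'], ['L','X','X'], ['L','X','X','X'], ['X','C']]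
def pvHundreds : List (List Char) :=
  [[], ['C'], ['C','C'], ['C','C','C'], ['C','D'], ['D'], ['D','C'], ['D','C','C'], ['D','C','C','C'], ['C','M']]

def pvPlaceValue (decimal : Int) : List Char :=
  PySem.List.pyRepeat ['M'] (PySem.Int.floordiv decimal 1000)
    ++ PySem.List.pyGetD pvHundreds (PySem.Int.mod (PySem.Int.floordiv decimal 100) 10) []
    ++ PySem.List.pyGetD pvTens (PySem.Int.mod (PySem.Int.floordiv decimal 10) 10) []
    ++ PySem.List.pyGetD pvOnes (PySem.Int.mod decimal 10) []

def RomanNumeralReduction_alt (strParam : String) : String :=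
  String.ofList (pvPlaceValue (pvSumLoop strParam.toList))

-- ===== PRECONDITION & SPEC =====
-- Pre_ excludes exactly the strings containing a char that is not a roman-numeral letter,
-- on which the Python A (and B) raises KeyError.
def Pre_RomanNumeralReduction (strParam : String) : Prop :=
  strParam.toList.all (fun c => pvRomanDecimalMap.contains c) = true
instance (strParam : String) : Decidable (Pre_RomanNumeralReduction strParam) := by
  unfold Pre_RomanNumeralReduction; infer_instance
def pvWitness_RomanNumeralReduction : String := "MCMXCIV"

def Spec_RomanNumeralReduction (strParam : String) (out : String) : Prop := out = RomanNumeralReduction_alt strParam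
instance (strParam : String) (out : String) : Decidable (Spec_RomanNumeralReduction strParam out) := by unfold Spec_RomanNumeralReduction; infer_instance

-- ===== CLAIM (what is proved, stated in full; the proofs are below) =====
def Claim_equal_RomanNumeralReduction : Prop := ∀ (strParam : String), Dom_RomanNumeralReduction strParam → Pre_RomanNumeralReduction strParam → Spec_RomanNumeralReduction strParam (RomanNumeralReduction strParam)

-- ===== LEMMAS AND PROOFS =====

-- the greedy loop after the 1000-entry, as a function of the remainder < 1000
def pvGreedyRest (d : Int) : List Char :=
  ((pvDeciamlRomanMap.drop 1).foldl pvStep ([], d)).1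

def pvPlaceRest (d : Int) : List Char :=
  PySem.List.pyGetD pvHundreds (PySem.Int.floordiv d 100) []
    ++ PySem.List.pyGetD pvTens (PySem.Int.mod (PySem.Int.floordiv d 10) 10) []
    ++ PySem.List.pyGetD pvOnes (PySem.Int.mod d 10) []

lemma pvRest_check :
    (List.range 1000).all (fun n => pvGreedyRest (n : Int) == pvPlaceRest (n : Int)) = true := by
  set_option maxRecDepth 10000 in decide

lemma pvRest_eq (d : Int) (h0 : 0 ≤ d) (h1 : d < 1000) :
    pvGreedyRest d = pvPlaceRest d := by
  have hn : d = ((d.toNat : Nat) : Int) := by omega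
  have hmem : d.toNat ∈ List.range 1000 := by
    simp [List.mem_range]; omega
  have := List.all_eq_true.mp pvRest_check _ hmem
  rw [hn]
  exact eq_of_beq this
lemma pvFold_pre (ps : List (Int × List Char)) (pre : List Char) (d : Int) :
    (ps.foldl pvStep (pre, d)).1 = pre ++ (ps.foldl pvStep ([], d)).1 := by
  induction ps generalizing pre d with
  | nil => simp
  | cons p ps ih =>
      simp only [List.foldl_cons, pvStep, List.nil_append]
      rw [ih, ih (PySem.List.pyRepeat p.2 (PySem.Int.floordiv d p.1))]
      simp [List.append_assoc]

lemma pvGreedy_split (d : Int) :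
    pvGreedyLoop d
      = PySem.List.pyRepeat ['M'] (PySem.Int.floordiv d 1000) ++ pvGreedyRest (PySem.Int.mod d 1000) := by
  have h1 : pvGreedyLoop d
      = ((pvDeciamlRomanMap.drop 1).foldl pvStep
          ([] ++ PySem.List.pyRepeat ['M'] (PySem.Int.floordiv d 1000), PySem.Int.mod d 1000)).1 := rfl
  rw [h1, List.nil_append, pvFold_pre]
  rfl

lemma pvGreedy_eq_place (d : Int) : pvGreedyLoop d = pvPlaceValue d := by
  have hm0 : 0 ≤ PySem.Int.mod d 1000 := PySem.Int.mod_nonneg d (by norm_num)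
  have hm1 : PySem.Int.mod d 1000 < 1000 := PySem.Int.mod_lt d (by norm_num)
  rw [pvGreedy_split, pvRest_eq _ hm0 hm1]
  unfold pvPlaceValue pvPlaceRest
  have e1 : PySem.Int.floordiv (PySem.Int.mod d 1000) 100
      = PySem.Int.mod (PySem.Int.floordiv d 100) 10 := by
    simp only [PySem.Int.floordiv_eq_ediv_of_pos (by norm_num : (0:Int) < 100),
      PySem.Int.mod_eq_emod_of_pos (by norm_num : (0:Int) < 10),
      PySem.Int.mod_eq_emod_of_pos (by norm_num : (0:Int) < 1000)]
    omega
  have e2 : PySem.Int.mod (PySem.Int.floordiv (PySem.Int.mod d 1000) 10) 10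
      = PySem.Int.mod (PySem.Int.floordiv d 10) 10 := by
    simp only [PySem.Int.floordiv_eq_ediv_of_pos (by norm_num : (0:Int) < 10),
      PySem.Int.mod_eq_emod_of_pos (by norm_num : (0:Int) < 10),
      PySem.Int.mod_eq_emod_of_pos (by norm_num : (0:Int) < 1000)]
    omega
  have e3 : PySem.Int.mod (PySem.Int.mod d 1000) 10 = PySem.Int.mod d 10 := by
    simp only [PySem.Int.mod_eq_emod_of_pos (by norm_num : (0:Int) < 10),
      PySem.Int.mod_eq_emod_of_pos (by norm_num : (0:Int) < 1000)]
    omega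
  rw [e1, e2, e3]
  simp [List.append_assoc]

theorem RomanNumeralReduction_spec : Claim_equal_RomanNumeralReduction := by
  intro s _ _
  show String.ofList (pvGreedyLoop (pvSumLoop s.toList)) = String.ofList (pvPlaceValue (pvSumLoop s.toList))
  rw [pvGreedy_eq_place]
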